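-- pv_equiv track=rewrite | github.com/JamesLeberknight/footbag-results | tools/52_build_inspector_mirror_truth.py | build_stage2_fallback_text
-- ===== SOURCE A (Python) =====
-- from collections import defaultdict
--
-- def build_stage2_fallback_text(placements):
--     """Build formatted text from stage2 placements_json."""
--     if not placements:
--         return ""
--     by_div = defaultdict(list)
--     for p in placements:
--         div = p.get("division", "") or "Unknown Division"
--         by_div[div].append(p)
--
--     lines = ["[FALLBACK: derived from stage2 parse, not mirror HTML]", ""]
--     for div, entries in by_div.items():
--         entries = sorted(
--             entries,
--             key=lambda x: (
--                 int(x.get("place", 999))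
--                 if str(x.get("place", "999")).isdigit()
--                 else 999
--             ),
--         )
--         n = len(entries)
--         lines.append(f"{div} ({n} placement{'s' if n != 1 else ''})")
--         for p in entries:
--             place = p.get("place", "?")
--             p1 = p.get("player1_name", "") or ""
--             p2 = p.get("player2_name", "") or ""
--             name = f"{p1} / {p2}" if p2 else (p1 or "[unknown]")
--             lines.append(f"  {place}. {name}")
--         lines.append("")
--     return "\n".join(lines)
-- ===== SOURCE B (Python) =====
-- def build_stage2_fallback_text(placements):
--     """Build formatted text from stage2 placements_json."""
--     if not placements:
--         return ""
--
--     def div_of(p):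
--         return p.get("division", "") or "Unknown Division"
--
--     def place_key(p):
--         s = str(p.get("place", "999"))
--         return int(s) if s.isdigit() else 999
--
--     def entry_line(p):
--         p1 = p.get("player1_name", "") or ""
--         p2 = p.get("player2_name", "") or ""
--         name = f"{p1} / {p2}" if p2 else (p1 or "[unknown]")
--         return f"  {p.get('place', '?')}. {name}"
--
--     def block(div):
--         entries = sorted((p for p in placements if div_of(p) == div), key=place_key)
--         n = len(entries)
--         header = f"{div} ({n} placement{'' if n == 1 else 's'})"
--         return [header] + [entry_line(p) for p in entries] + [""]
--
--     divs = list(dict.fromkeys(div_of(p) for p in placements))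
--     lines = ["[FALLBACK: derived from stage2 parse, not mirror HTML]", ""]
--     for d in divs:
--         lines.extend(block(d))
--     return "\n".join(lines)
-- ===== Notes on version B (the rewrite author's own statement) =====
-- stated objective: alternative
-- what changed: Instead of bucketing placements into a defaultdict and looping over its items with repeated list appends, B dedups the division names in first-appearance order, then builds each division's block by filtering + sorting and concatenates the blocks (extend/flatMap), keeping the same formatting.
import Mathlib
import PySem

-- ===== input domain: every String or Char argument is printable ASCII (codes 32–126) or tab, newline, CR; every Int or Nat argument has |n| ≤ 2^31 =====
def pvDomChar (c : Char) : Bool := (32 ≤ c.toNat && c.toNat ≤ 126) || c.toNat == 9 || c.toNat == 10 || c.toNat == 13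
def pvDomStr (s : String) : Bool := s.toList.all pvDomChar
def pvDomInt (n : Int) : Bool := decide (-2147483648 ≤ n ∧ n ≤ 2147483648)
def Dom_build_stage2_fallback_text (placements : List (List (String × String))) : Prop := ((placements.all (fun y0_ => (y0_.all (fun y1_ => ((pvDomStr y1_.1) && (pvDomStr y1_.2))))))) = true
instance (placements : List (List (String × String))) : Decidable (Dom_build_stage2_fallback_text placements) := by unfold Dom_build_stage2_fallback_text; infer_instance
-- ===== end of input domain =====

-- B replaces A's defaultdict bucketing + item loop by ordered dedup of division names and
-- per-division filter/sort blocks concatenated with flatMap (same output; objective: alternative).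


-- ===== PORT A =====
def build_stage2_fallback_text (placements : List (List (String × String))) : String :=
  if placements = [] then ""
  else
    let by_div : PySem.Dict String (List (List (String × String))) :=
      placements.foldl (fun d p =>
        let div := if (List.lookup "division" p).getD "" = "" then "Unknown Division"
                   else (List.lookup "division" p).getD ""
        d.modify div [] (· ++ [p])) PySem.Dict.empty
    let lines := ["[FALLBACK: derived from stage2 parse, not mirror HTML]", ""]
    let lines := by_div.items.foldl (fun lines de =>
      let entries := PySem.List.sorted de.2
        (fun x => if PySem.Str.strIsdigit ((List.lookup "place" x).getD "999")
                  then (PySem.Int.ofStr? ((List.lookup "place" x).getD "999")).getD 999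
                  else 999) false
      let n := entries.length
      let lines := lines ++ [de.1 ++ " (" ++ PySem.Int.toStr n ++ " placement" ++ (if n ≠ 1 then "s" else "") ++ ")"]
      let lines := entries.foldl (fun lines p =>
        let place := (List.lookup "place" p).getD "?"
        let p1 := (List.lookup "player1_name" p).getD ""
        let p2 := (List.lookup "player2_name" p).getD ""
        let name := if p2 ≠ "" then p1 ++ " / " ++ p2 else (if p1 ≠ "" then p1 else "[unknown]")
        lines ++ ["  " ++ place ++ ". " ++ name]) lines
      lines ++ [""]) lines
    PySem.Str.join "\n" lines

-- ===== PORT B =====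
def pvDivOf (p : List (String × String)) : String :=
  let d := (List.lookup "division" p).getD ""
  if d = "" then "Unknown Division" else d

def pvPlaceKey (p : List (String × String)) : Int :=
  let s := (List.lookup "place" p).getD "999"
  if PySem.Str.strIsdigit s then (PySem.Int.ofStr? s).getD 999 else 999

def pvEntryLine (p : List (String × String)) : String :=
  let p1 := (List.lookup "player1_name" p).getD ""
  let p2 := (List.lookup "player2_name" p).getD ""
  let name := if p2 ≠ "" then p1 ++ " / " ++ p2 else (if p1 ≠ "" then p1 else "[unknown]")
  "  " ++ (List.lookup "place" p).getD "?" ++ ". " ++ name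

def pvBlock (placements : List (List (String × String))) (div : String) : List String :=
  let entries := PySem.List.sorted (placements.filter (fun p => pvDivOf p == div)) pvPlaceKey false
  let n := entries.length
  (div ++ " (" ++ PySem.Int.toStr n ++ " placement" ++ (if n = 1 then "" else "s") ++ ")")
    :: (entries.map pvEntryLine ++ [""])

def build_stage2_fallback_text_alt (placements : List (List (String × String))) : String :=
  if placements = [] then ""
  else
    let divs := PySem.List.dedup (placements.map pvDivOf)
    PySem.Str.join "\n"
      ("[FALLBACK: derived from stage2 parse, not mirror HTML]" :: "" :: divs.flatMap (pvBlock placements))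

-- ===== PRECONDITION & SPEC =====
def Spec_build_stage2_fallback_text (placements : List (List (String × String))) (out : String) : Prop := out = build_stage2_fallback_text_alt placements
instance (placements : List (List (String × String))) (out : String) : Decidable (Spec_build_stage2_fallback_text placements out) := by unfold Spec_build_stage2_fallback_text; infer_instance

-- ===== CLAIM (what is proved, stated in full; the proofs are below) =====
def Claim_equal_build_stage2_fallback_text : Prop := ∀ (placements : List (List (String × String))), Dom_build_stage2_fallback_text placements → Spec_build_stage2_fallback_text placements (build_stage2_fallback_text placements)

-- ===== LEMMAS AND PROOFS =====

theorem pv_fold_eq (placements : List (List (String × String))) :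
    placements.foldl (fun (d : PySem.Dict String (List (List (String × String)))) p =>
        let div := if (List.lookup "division" p).getD "" = "" then "Unknown Division"
                   else (List.lookup "division" p).getD ""
        d.modify div [] (· ++ [p])) PySem.Dict.empty
    = placements.foldl (fun d p => d.modify (pvDivOf p) [] (· ++ [p])) PySem.Dict.empty := rfl

theorem pv_keys (placements : List (List (String × String))) :
    (placements.foldl (fun (d : PySem.Dict String (List (List (String × String)))) p =>
      d.modify (pvDivOf p) [] (· ++ [p])) PySem.Dict.empty).keys
    = PySem.List.dedup (placements.map pvDivOf) := by
  rw [PySem.Dict.keys_foldl_modify_key]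
  simp [PySem.Set.update_nil_left]

theorem pv_nodup (placements : List (List (String × String))) :
    (placements.foldl (fun (d : PySem.Dict String (List (List (String × String)))) p =>
      d.modify (pvDivOf p) [] (· ++ [p])) PySem.Dict.empty).keys.Nodup := by
  exact PySem.Dict.nodup_keys_foldl_modify_key placements pvDivOf [] (fun _ p => (· ++ [p])) _ PySem.Dict.nodup_keys_empty

theorem pv_getD (placements : List (List (String × String))) (k : String) :
    (placements.foldl (fun (d : PySem.Dict String (List (List (String × String)))) p =>
      d.modify (pvDivOf p) [] (· ++ [p])) PySem.Dict.empty).getD k []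
    = placements.filter (fun p => pvDivOf p == k) := by
  have h1 : placements.foldl (fun (d : PySem.Dict String (List (List (String × String)))) p =>
      d.modify (pvDivOf p) [] (· ++ [p])) PySem.Dict.empty
      = (placements.map (fun p => (pvDivOf p, p))).foldl
          (fun d q => d.modify q.1 [] (· ++ [q.2])) PySem.Dict.empty := by
    rw [List.foldl_map]
  rw [h1, PySem.Dict.getD_foldl_modify_append]
  simp [List.filter_map, Function.comp_def, List.map_map]
theorem pv_items (placements : List (List (String × String))) :
    (placements.foldl (fun (d : PySem.Dict String (List (List (String × String)))) p =>
      d.modify (pvDivOf p) [] (· ++ [p])) PySem.Dict.empty).items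
    = (PySem.List.dedup (placements.map pvDivOf)).map
        (fun k => (k, placements.filter (fun p => pvDivOf p == k))) := by
  rw [PySem.Dict.items_eq_map_keys _ (pv_nodup placements) [], pv_keys]
  exact List.map_congr_left (fun k _ => by rw [pv_getD])

theorem pv_main : ∀ placements, build_stage2_fallback_text placements = build_stage2_fallback_text_alt placements := by
  intro placements
  by_cases h : placements = []
  · simp [build_stage2_fallback_text, build_stage2_fallback_text_alt, h]
  · unfold build_stage2_fallback_text build_stage2_fallback_text_alt
    simp only [if_neg h]
    rw [pv_fold_eq, pv_items, List.foldl_map]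
    congr 1
    have hF : (fun (lines : List String) (k : String) =>
        (fun (lines : List String) (de : String × List (List (String × String))) =>
          let entries := PySem.List.sorted de.2
            (fun x => if PySem.Str.strIsdigit ((List.lookup "place" x).getD "999")
                      then (PySem.Int.ofStr? ((List.lookup "place" x).getD "999")).getD 999
                      else 999) false
          let n := entries.length
          let lines := lines ++ [de.1 ++ " (" ++ PySem.Int.toStr n ++ " placement" ++ (if n ≠ 1 then "s" else "") ++ ")"]
          let lines := entries.foldl (fun lines p =>
            let place := (List.lookup "place" p).getD "?"
            let p1 := (List.lookup "player1_name" p).getD ""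
            let p2 := (List.lookup "player2_name" p).getD ""
            let name := if p2 ≠ "" then p1 ++ " / " ++ p2 else (if p1 ≠ "" then p1 else "[unknown]")
            lines ++ ["  " ++ place ++ ". " ++ name]) lines
          lines ++ [""]) lines (k, placements.filter (fun p => pvDivOf p == k)))
        = fun lines k => lines ++ pvBlock placements k := by
      funext lines k
      show _ = lines ++ pvBlock placements k
      rw [pvBlock]
      dsimp only
      rw [PySem.List.foldl_append_singleton_eq_map]
      have hite : ∀ n : Nat, (if n ≠ 1 then "s" else "") = (if n = 1 then "" else "s") := by
        intro n; by_cases hn : n = 1 <;> simp [hn]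
      simp only [hite, List.append_assoc, List.cons_append, List.nil_append]
      rfl
    rw [hF, PySem.List.foldl_append_eq_flatMap]
    rfl

-- ===== VERDICT (by name: the statement is the Claim_ definition above) =====
theorem build_stage2_fallback_text_spec : Claim_equal_build_stage2_fallback_text := by
  intro placements _
  exact pv_main placements
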